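-- pv_equiv track=rewrite | github.com/itamar-sh/Python-Tool-Kit | tasks_scheduler/schedule.py | rearrange_assignments_names_for_display
-- ===== SOURCE A (Python) =====
-- def rearrange_assignments_names_for_display(assignments_names):
--     assignments_names_labels = []
--     assignments_names_spans = []
--     current_row_span = 0
--     current_assignment_name = assignments_names[0]
--     for assignment_name in assignments_names:
--         if assignment_name != current_assignment_name:
--             assignments_names_labels.append(current_assignment_name)
--             assignments_names_spans.append(current_row_span)
--             current_assignment_name = assignment_name
--             current_row_span = 1
--         else:
--             current_row_span += 1
--     assignments_names_labels.append(current_assignment_name)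
--     assignments_names_spans.append(current_row_span)
--     return assignments_names_labels, assignments_names_spans
-- ===== SOURCE B (Python) =====
-- def rearrange_assignments_names_for_display(assignments_names):
--     if not assignments_names:
--         return [], []
--     if len(assignments_names) == 1:
--         return [assignments_names[0]], [1]
--     mid = len(assignments_names) // 2
--     left_labels, left_spans = rearrange_assignments_names_for_display(assignments_names[:mid])
--     right_labels, right_spans = rearrange_assignments_names_for_display(assignments_names[mid:])
--     if left_labels[-1] == right_labels[0]:
--         return (left_labels[:-1] + right_labels,
--                 left_spans[:-1] + [left_spans[-1] + right_spans[0]] + right_spans[1:])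
--     return left_labels + right_labels, left_spans + right_spans
-- ===== Notes on version B (the rewrite author's own statement) =====
-- stated objective: alternative
-- what changed: Replaces A's one-pass current-name/current-span state machine with a divide-and-conquer recursion: split the list at the midpoint, run-length encode each half recursively, and merge the two (labels, spans) pairs, fusing the boundary runs when the adjacent labels coincide; Pre_ excludes the empty list, on which A raises IndexError while B returns ([], []).
import Mathlib
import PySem

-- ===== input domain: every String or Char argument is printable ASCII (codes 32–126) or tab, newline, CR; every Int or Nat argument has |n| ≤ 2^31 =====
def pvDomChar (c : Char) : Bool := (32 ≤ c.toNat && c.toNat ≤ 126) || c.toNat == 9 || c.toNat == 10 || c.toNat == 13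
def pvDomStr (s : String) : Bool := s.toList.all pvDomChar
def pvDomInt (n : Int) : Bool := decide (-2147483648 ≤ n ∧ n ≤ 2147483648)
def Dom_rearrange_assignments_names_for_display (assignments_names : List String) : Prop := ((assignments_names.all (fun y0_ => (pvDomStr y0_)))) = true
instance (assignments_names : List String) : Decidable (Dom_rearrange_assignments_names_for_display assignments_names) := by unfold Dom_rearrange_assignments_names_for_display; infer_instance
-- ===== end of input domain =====

-- ===== PORT A =====
-- Header: B replaces A's one-pass state machine by a divide-and-conquer recursion (split in
-- half, recurse, merge at the boundary run); alternative decomposition, same asymptotic cost.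
-- On the empty list A raises IndexError (excluded by Pre_) while B returns ([], []).
-- Loop of A: state (labels, spans, current_row_span, current_assignment_name).
def pvLoopA : List String → List String → List Int → Int → String → List String × List Int
  | [], labels, spans, span, cur => (labels ++ [cur], spans ++ [span])
  | a :: rest, labels, spans, span, cur =>
    if a ≠ cur then pvLoopA rest (labels ++ [cur]) (spans ++ [span]) 1 a
    else pvLoopA rest labels spans (span + 1) cur

def rearrange_assignments_names_for_display (assignments_names : List String) : List String × List Int :=
  match assignments_names with
  | [] => ([], [])  -- unreachable under Pre_: Python raises IndexError on assignments_names[0]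
  | h :: _ => pvLoopA assignments_names [] [] 0 h

-- ===== PORT B =====
-- divide and conquer: split at mid = len // 2, recurse on both halves, merge the two
-- (labels, spans) pairs, fusing the boundary runs when the adjacent labels coincide.
-- pvHalveGo carries a fuel parameter (initially the list's length) only to make the
-- recursion structural; the fuel never runs out on the calls alt makes.
def pvHalveGo : Nat → List String → List String × List Int
  | _, [] => ([], [])
  | _, [x] => ([x], [1])
  | 0, _ :: _ :: _ => ([], [])  -- unreachable: fuel starts at the list's length
  | fuel + 1, a :: b :: t =>
    let mid := PySem.Int.floordiv ((a :: b :: t).length : Int) 2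
    let lp := pvHalveGo fuel (PySem.List.slice (a :: b :: t) none (some mid))
    let rp := pvHalveGo fuel (PySem.List.slice (a :: b :: t) (some mid) none)
    if lp.1.getLast? == rp.1.head? then
      (lp.1.dropLast ++ rp.1,
       lp.2.dropLast ++ [lp.2.getLastD 0 + rp.2.headD 0] ++ rp.2.drop 1)
    else (lp.1 ++ rp.1, lp.2 ++ rp.2)

def rearrange_assignments_names_for_display_alt (assignments_names : List String) : List String × List Int :=
  pvHalveGo assignments_names.length assignments_names

-- ===== PRECONDITION & SPEC =====
-- Pre_ excludes only the empty list, on which A raises IndexError (B returns ([], []) there).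
def Pre_rearrange_assignments_names_for_display (assignments_names : List String) : Prop :=
  assignments_names ≠ []
instance (assignments_names : List String) : Decidable (Pre_rearrange_assignments_names_for_display assignments_names) := by
  unfold Pre_rearrange_assignments_names_for_display; infer_instance

def pvWitness_rearrange_assignments_names_for_display : List String := ["a", "a", "b", "a"]

def Spec_rearrange_assignments_names_for_display (assignments_names : List String) (out : List String × List Int) : Prop := out = rearrange_assignments_names_for_display_alt assignments_names
instance (assignments_names : List String) (out : List String × List Int) : Decidable (Spec_rearrange_assignments_names_for_display assignments_names out) := by unfold Spec_rearrange_assignments_names_for_display; infer_instance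

-- ===== CLAIM (what is proved, stated in full; the proofs are below) =====
def Claim_equal_rearrange_assignments_names_for_display : Prop := ∀ (assignments_names : List String), Dom_rearrange_assignments_names_for_display assignments_names → Pre_rearrange_assignments_names_for_display assignments_names → Spec_rearrange_assignments_names_for_display assignments_names (rearrange_assignments_names_for_display assignments_names)

-- ===== LEMMAS AND PROOFS =====

-- Run-length encoding as a right fold: consRun pushes one element onto an RLE.
def consRun (x : String) : List (String × Int) → List (String × Int)
  | (y, k) :: t => if y == x then (x, k + 1) :: t else (x, 1) :: (y, k) :: t
  | [] => [(x, 1)]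

def rleR (l : List String) : List (String × Int) := l.foldr consRun []

-- glue: concatenate two RLEs, fusing the boundary runs if their labels coincide.
def pvGlue : List (String × Int) → List (String × Int) → List (String × Int)
  | [], r => r
  | [(a, k)], r =>
    match r with
    | (b, m) :: t => if a == b then (a, k + m) :: t else (a, k) :: (b, m) :: t
    | [] => [(a, k)]
  | p :: q :: s, r => p :: pvGlue (q :: s) r

theorem glue_single_one (a : String) (r : List (String × Int)) :
    pvGlue [(a, 1)] r = consRun a r := by
  match r with
  | [] => rfl
  | (b, m) :: t =>
    by_cases h : a = b
    · subst h; simp [pvGlue, consRun]; omega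
    · have h1 : (a == b) = false := by simp [h]
      have h2 : (b == a) = false := by simp [Ne.symm h]
      simp [pvGlue, consRun, h1, h2]

theorem consRun_glue (x : String) (s r : List (String × Int)) :
    consRun x (pvGlue s r) = pvGlue (consRun x s) r := by
  match s with
  | [] =>
    show consRun x r = pvGlue (consRun x []) r
    rw [show consRun x ([] : List (String × Int)) = [(x, 1)] from rfl]
    exact (glue_single_one x r).symm
  | [(a, k)] =>
    match r with
    | [] =>
      by_cases h : a = x
      · subst h; simp [pvGlue, consRun]
      · have h1 : (a == x) = false := by simp [h]
        simp [pvGlue, consRun, h1]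
    | (b, m) :: t =>
      by_cases hab : a = b
      · subst hab
        by_cases hax : a = x
        · subst hax; simp [pvGlue, consRun]; omega
        · have h1 : (a == x) = false := by simp [hax]
          simp [pvGlue, consRun, h1]
      · have h3 : (a == b) = false := by simp [hab]
        by_cases hax : a = x
        · subst hax; simp [pvGlue, consRun, h3]
        · have h1 : (a == x) = false := by simp [hax]
          simp [pvGlue, consRun, h1, h3]
  | (a, k) :: (c, j) :: s' =>
    by_cases h : a = x
    · subst h; simp [pvGlue, consRun]
    · have h1 : (a == x) = false := by simp [h]
      simp [pvGlue, consRun, h1]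

theorem foldr_glue (l : List String) (r : List (String × Int)) :
    l.foldr consRun r = pvGlue (rleR l) r := by
  induction l with
  | nil => simp [rleR, pvGlue]
  | cons x xs ih =>
    simp only [List.foldr_cons, ih]
    rw [show rleR (x :: xs) = consRun x (rleR xs) from rfl, consRun_glue]

theorem rleR_append (l1 l2 : List String) :
    rleR (l1 ++ l2) = pvGlue (rleR l1) (rleR l2) := by
  rw [rleR, List.foldr_append]
  rw [show l2.foldr consRun [] = rleR l2 from rfl]
  exact foldr_glue l1 (rleR l2)

theorem rleR_ne_nil (l : List String) (h : l ≠ []) : rleR l ≠ [] := by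
  match l with
  | x :: xs =>
    rw [show rleR (x :: xs) = consRun x (rleR xs) from rfl]
    cases rleR xs with
    | nil => simp [consRun]
    | cons p t => obtain ⟨y, k⟩ := p; by_cases hy : (y == x) = true <;> simp [consRun, hy]

-- A's accumulator loop, without accumulators.
def pvMix : List String → Int → String → List (String × Int)
  | [], span, cur => [(cur, span)]
  | a :: r, span, cur =>
    if a ≠ cur then (cur, span) :: pvMix r 1 a else pvMix r (span + 1) cur

theorem glue_single_cons (c : String) (s : Int) (x : String) (rr : List (String × Int))
    (hx : c ≠ x) : pvGlue [(c, s)] (consRun x rr) = (c, s) :: consRun x rr := by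
  have h1 : (c == x) = false := by simp [hx]
  cases rr with
  | nil => simp [consRun, pvGlue, h1]
  | cons p t =>
    obtain ⟨y, k⟩ := p
    by_cases hy : y = x
    · subst hy; simp [consRun, pvGlue, h1]
    · have h2 : (y == x) = false := by simp [hy]
      simp [consRun, pvGlue, h1, h2]

theorem pvMix_eq_glue (t : List String) : ∀ (span : Int) (cur : String),
    pvMix t span cur = pvGlue [(cur, span)] (rleR t) := by
  induction t with
  | nil => intro span cur; rfl
  | cons a r ih =>
    intro span cur
    rw [show rleR (a :: r) = consRun a (rleR r) from rfl]
    by_cases h : a = cur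
    · subst h
      rw [show pvMix (a :: r) span a = pvMix r (span + 1) a by simp [pvMix], ih]
      cases hr : rleR r with
      | nil => simp [consRun, pvGlue]
      | cons p tl =>
        obtain ⟨b, m⟩ := p
        by_cases hb : b = a
        · subst hb; simp [consRun, pvGlue]; omega
        · have h1 : (b == a) = false := by simp [hb]
          have h2 : (a == b) = false := by simp [Ne.symm hb]
          simp [consRun, pvGlue, h1, h2]
    · rw [show pvMix (a :: r) span cur = (cur, span) :: pvMix r 1 a by simp [pvMix, h], ih,
          glue_single_one, glue_single_cons cur span a (rleR r) (Ne.symm h)]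

-- A's loop result in terms of pvMix.
theorem pvLoopA_eq_mix (rest : List String) : ∀ (labels : List String) (spans : List Int) (span : Int) (cur : String),
    pvLoopA rest labels spans span cur =
      (labels ++ (pvMix rest span cur).map Prod.fst, spans ++ (pvMix rest span cur).map Prod.snd) := by
  induction rest with
  | nil => intro labels spans span cur; simp [pvLoopA, pvMix]
  | cons a r ih =>
    intro labels spans span cur
    by_cases h : a = cur
    · simp [pvLoopA, pvMix, h, ih]
    · simp [pvLoopA, pvMix, h, ih]

-- A computes the unzipped rleR.
theorem A_eq_rleR (h : String) (t : List String) :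
    rearrange_assignments_names_for_display (h :: t) =
      ((rleR (h :: t)).map Prod.fst, (rleR (h :: t)).map Prod.snd) := by
  show pvLoopA (h :: t) [] [] 0 h = _
  rw [show pvLoopA (h :: t) [] [] 0 h = pvLoopA t [] [] 1 h by simp [pvLoopA]]
  rw [pvLoopA_eq_mix, pvMix_eq_glue, glue_single_one]
  rw [show rleR (h :: t) = consRun h (rleR t) from rfl]
  simp

-- unzipping pvGlue matches B's merge of the two unzipped halves.
theorem unzip_glue (r1 r2 : List (String × Int)) (h1 : r1 ≠ []) (h2 : r2 ≠ []) :
    ((if (r1.map Prod.fst).getLast? == (r2.map Prod.fst).head? then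
        ((r1.map Prod.fst).dropLast ++ r2.map Prod.fst,
         (r1.map Prod.snd).dropLast ++ [(r1.map Prod.snd).getLastD 0 + (r2.map Prod.snd).headD 0] ++ (r2.map Prod.snd).drop 1)
      else (r1.map Prod.fst ++ r2.map Prod.fst, r1.map Prod.snd ++ r2.map Prod.snd))
      : List String × List Int)
      = ((pvGlue r1 r2).map Prod.fst, (pvGlue r1 r2).map Prod.snd) := by
  match r1 with
  | [(a, k)] =>
    match r2 with
    | (b, m) :: t =>
      by_cases hab : a = b
      · subst hab; simp [pvGlue]
      · have h3 : (a == b) = false := by simp [hab]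
        simp [pvGlue, h3]
  | (a, k) :: (c, j) :: s =>
    have ih := unzip_glue ((c, j) :: s) r2 (by simp) h2
    have e1 := congrArg Prod.fst ih
    have e2 := congrArg Prod.snd ih
    simp only at e1 e2
    rw [show pvGlue ((a,k) :: (c,j) :: s) r2 = (a,k) :: pvGlue ((c,j) :: s) r2 from rfl]
    have hlast : (((a,k) :: (c,j) :: s).map Prod.fst).getLast?
        = (((c,j) :: s).map (Prod.fst (β := Int))).getLast? := by simp
    by_cases hcond : ((((c,j) :: s).map (Prod.fst (β := Int))).getLast? == (r2.map Prod.fst).head?) = true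
    · simp only [hcond, if_true] at e1 e2
      rw [if_pos (by rw [hlast]; exact hcond)]
      simp only [List.map_cons, Prod.mk.injEq]
      constructor
      · rw [show ((a : String) :: (c :: s.map Prod.fst)).dropLast
            = a :: ((c :: s.map (Prod.fst (β := Int))).dropLast) by simp]
        rw [List.cons_append]
        rw [show ((c : String) :: s.map Prod.fst).dropLast ++ r2.map Prod.fst
            = List.map Prod.fst (pvGlue ((c, j) :: s) r2) from by simpa using e1]
      · simp only [List.map_cons] at e2
        rw [show ((k : Int) :: j :: s.map Prod.snd).dropLast
            = k :: (((j : Int) :: s.map Prod.snd).dropLast) by simp,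
          show ((k : Int) :: j :: s.map Prod.snd).getLastD 0
            = ((j : Int) :: s.map Prod.snd).getLastD 0 by simp]
        simp only [List.cons_append]
        rw [e2]
    · have hf : ((((c,j) :: s).map (Prod.fst (β := Int))).getLast? == (r2.map Prod.fst).head?) = false := by
        simpa using hcond
      simp only [hf, Bool.false_eq_true, if_false] at e1 e2
      rw [if_neg (by rw [hlast, hf]; simp)]
      simp only [List.map_cons, List.cons_append, Prod.mk.injEq]
      constructor
      · rw [show (c : String) :: (s.map Prod.fst ++ r2.map Prod.fst)
            = List.map Prod.fst (pvGlue ((c, j) :: s) r2) from by simpa using e1]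
      · rw [show (j : Int) :: (s.map Prod.snd ++ r2.map Prod.snd)
            = List.map Prod.snd (pvGlue ((c, j) :: s) r2) from by simpa using e2]

-- B computes the unzipped rleR (with enough fuel).
theorem pvHalveGo_eq_rleR (fuel : Nat) : ∀ (l : List String), l.length ≤ fuel → l ≠ [] →
    pvHalveGo fuel l = ((rleR l).map Prod.fst, (rleR l).map Prod.snd) := by
  induction fuel with
  | zero =>
    intro l hl hne
    match l with
    | [x] => simp at hl
  | succ f ih =>
    intro l hl hne
    match l with
    | [x] => simp [pvHalveGo, rleR, consRun]
    | a :: b :: t =>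
      rw [show pvHalveGo (f + 1) (a :: b :: t) =
        (let mid := PySem.Int.floordiv ((a :: b :: t).length : Int) 2
         let lp := pvHalveGo f (PySem.List.slice (a :: b :: t) none (some mid))
         let rp := pvHalveGo f (PySem.List.slice (a :: b :: t) (some mid) none)
         if lp.1.getLast? == rp.1.head? then
           (lp.1.dropLast ++ rp.1,
            lp.2.dropLast ++ [lp.2.getLastD 0 + rp.2.headD 0] ++ rp.2.drop 1)
         else (lp.1 ++ rp.1, lp.2 ++ rp.2)) from rfl]
      have hmid : PySem.Int.floordiv (((a :: b :: t).length : Nat) : Int) 2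
          = (((a :: b :: t).length / 2 : Nat) : Int) := by
        exact_mod_cast PySem.Int.floordiv_natCast (a :: b :: t).length 2
      set m : Nat := (a :: b :: t).length / 2 with hm
      have hsl : PySem.List.slice (a :: b :: t) none (some (PySem.Int.floordiv (((a :: b :: t).length : Nat) : Int) 2))
          = (a :: b :: t).take m := by rw [hmid]; exact PySem.List.slice_to_natCast _ _
      have hsr : PySem.List.slice (a :: b :: t) (some (PySem.Int.floordiv (((a :: b :: t).length : Nat) : Int) 2)) none
          = (a :: b :: t).drop m := by rw [hmid]; exact PySem.List.slice_from_natCast _ _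
      have hlen : (a :: b :: t).length = t.length + 2 := by simp
      have hmb : 1 ≤ m ∧ m < (a :: b :: t).length := by rw [hm, hlen]; omega
      have htake : (a :: b :: t).take m ≠ [] := by
        have hl' : ((a :: b :: t).take m).length = min m (a :: b :: t).length := by simp
        intro hc; rw [hc] at hl'; simp at hl'; omega
      have hdrop : (a :: b :: t).drop m ≠ [] := by
        have hl' : ((a :: b :: t).drop m).length = (a :: b :: t).length - m := by simp
        intro hc; rw [hc] at hl'; simp at hl'; omega
      have ihl := ih ((a :: b :: t).take m)
        (by have : ((a :: b :: t).take m).length = min m (a :: b :: t).length := by simp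
            omega) htake
      have ihr := ih ((a :: b :: t).drop m)
        (by have : ((a :: b :: t).drop m).length = (a :: b :: t).length - m := by simp
            omega) hdrop
      simp only [hsl, hsr, ihl, ihr]
      have hglue : rleR (a :: b :: t) = pvGlue (rleR ((a :: b :: t).take m)) (rleR ((a :: b :: t).drop m)) := by
        conv_lhs => rw [← List.take_append_drop m (a :: b :: t)]
        exact rleR_append _ _
      rw [hglue]
      exact unzip_glue (rleR ((a :: b :: t).take m)) (rleR ((a :: b :: t).drop m))
        (rleR_ne_nil _ htake) (rleR_ne_nil _ hdrop)

theorem B_eq_rleR (l : List String) (h : l ≠ []) :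
    rearrange_assignments_names_for_display_alt l =
      ((rleR l).map Prod.fst, (rleR l).map Prod.snd) := by
  exact pvHalveGo_eq_rleR l.length l (le_refl _) h

-- ===== VERDICT (by name: the statement is the Claim_ definition above) =====
theorem rearrange_assignments_names_for_display_spec : Claim_equal_rearrange_assignments_names_for_display := by
  intro l _ hpre
  unfold Spec_rearrange_assignments_names_for_display
  match l with
  | [] => exact absurd rfl hpre
  | h :: t => rw [A_eq_rleR, B_eq_rleR _ (by simp)]
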